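-- pv_equiv track=rewrite | github.com/mirarifhasan/QASystem | name_entity_google_search/get resource name from google search.py | get_resource_name
-- ===== SOURCE A (Python) =====
-- def get_resource_name(link):
--     resource = ''
--     wiki_link = "wikipedia.org/wiki/"
--     index = link.find(wiki_link)
--     if index == -1:
--         return resource
--     index = index + len(wiki_link)
--     for i in range(index, len(link)):
--         character = link[i]
--         if character.isalpha() or character == '_' or character == '(' or character == ')':
--             resource = resource + character
--         else:
--             break
--     return resource
-- ===== SOURCE B (Python) =====
-- import re
--
-- # One regex does the locate-and-scan in a single shot: literal marker followed by a
-- # greedy capture of the allowed run (Unicode letters via [^\W\d], underscore, parens).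
-- _PAT = re.compile(r'wikipedia\.org/wiki/((?:[^\W\d]|[()])*)')
--
-- def get_resource_name(link):
--     m = _PAT.search(link)
--     return m.group(1) if m else ''
-- ===== Notes on version B (the rewrite author's own statement) =====
-- stated objective: idiomatic
-- what changed: Replaces the manual substring find plus a per-character accumulation loop with a single compiled regex search whose greedy capture group extracts the allowed run in one shot.
import Mathlib
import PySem

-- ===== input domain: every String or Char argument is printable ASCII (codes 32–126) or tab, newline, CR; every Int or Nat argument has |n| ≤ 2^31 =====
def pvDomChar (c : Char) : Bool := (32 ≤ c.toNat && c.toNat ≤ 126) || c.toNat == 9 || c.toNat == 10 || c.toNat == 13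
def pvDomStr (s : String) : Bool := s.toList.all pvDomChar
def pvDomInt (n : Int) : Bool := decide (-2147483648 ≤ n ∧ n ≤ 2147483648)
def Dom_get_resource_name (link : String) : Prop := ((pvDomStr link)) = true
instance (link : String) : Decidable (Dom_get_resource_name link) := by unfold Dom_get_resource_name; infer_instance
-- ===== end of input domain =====

-- B replaces A's manual find + per-character accumulation loop with one regex search
-- (literal marker + greedy capture of the allowed run); objective: idiomatic.

-- ===== PORT A =====
-- A's for-loop over range(index, len(link)) with break: structural recursion over the
-- character list from position index, accumulating 'resource' exactly as A does.
def pvLoopA : String → List Char → String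
  | resource, [] => resource
  | resource, character :: rest =>
    if PySem.Chars.isalpha character || character == '_' || character == '(' || character == ')' then
      pvLoopA (resource ++ String.ofList [character]) rest
    else
      resource

def get_resource_name (link : String) : String :=
  let resource := ""
  let wiki_link := "wikipedia.org/wiki/"
  let index := PySem.Str.find link wiki_link
  if index == -1 then resource
  else
    let index := index + (PySem.Str.len wiki_link : Int)
    pvLoopA resource (link.toList.drop index.toNat)

-- ===== PORT B =====
-- Source B's compiled regex r'wikipedia\.org/wiki/((?:[^\W\d]|[()])*)'; re.search anchors the
-- match at the first occurrence of the literal marker (the capture may be empty) and the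
-- greedy capture of the character class is takeWhile of that class on the rest.
-- Exact on Dom (ASCII), where [^\W\d] = letters ∪ '_' as Python's isalpha/'_'.
def pvAllowedB (c : Char) : Bool :=
  PySem.Chars.isalpha c || c == '_' || c == '(' || c == ')'

def get_resource_name_alt (link : String) : String :=
  let f := PySem.Str.find link "wikipedia.org/wiki/"
  if f = -1 then ""
  else String.ofList ((link.toList.drop (f.toNat + 19)).takeWhile pvAllowedB)

-- ===== PRECONDITION & SPEC =====
def Spec_get_resource_name (link : String) (out : String) : Prop := out = get_resource_name_alt link
instance (link : String) (out : String) : Decidable (Spec_get_resource_name link out) := by unfold Spec_get_resource_name; infer_instance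

-- ===== CLAIM (what is proved, stated in full; the proofs are below) =====
def Claim_equal_get_resource_name : Prop := ∀ (link : String), Dom_get_resource_name link → Spec_get_resource_name link (get_resource_name link)

-- ===== LEMMAS AND PROOFS =====
theorem pvLoopA_takeWhile (l : List Char) (acc : String) :
    pvLoopA acc l = acc ++ String.ofList (l.takeWhile pvAllowedB) := by
  induction l generalizing acc with
  | nil => simp [pvLoopA]
  | cons c rest ih =>
    by_cases h : pvAllowedB c = true
    · have h' := h
      unfold pvAllowedB at h'
      simp only [pvLoopA, h', if_true, List.takeWhile, h, ih]
      simp [← String.ofList_append, String.append_assoc]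
    · have h' := h
      unfold pvAllowedB at h'
      simp [pvLoopA, h', List.takeWhile, h]

-- ===== VERDICT (by name: the statement is the Claim_ definition above) =====
theorem get_resource_name_spec : Claim_equal_get_resource_name := by
  intro link _
  unfold Spec_get_resource_name get_resource_name get_resource_name_alt
  simp only []
  by_cases h : PySem.Str.find link "wikipedia.org/wiki/" = -1
  · simp only [PySem.Str.find,
      show "wikipedia.org/wiki/".toList
        = ['w','i','k','i','p','e','d','i','a','.','o','r','g','/','w','i','k','i','/'] from rfl] at h
    simp [h]
  · simp only [beq_iff_eq, if_neg h]
    rw [pvLoopA_takeWhile]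
    have hnn : 0 ≤ PySem.Str.find link "wikipedia.org/wiki/" := by
      rcases lt_or_ge (PySem.Str.find link "wikipedia.org/wiki/") 0 with hlt | hge
      · exfalso; apply h
        have := PySem.Chars.neg_one_le_find link.toList "wikipedia.org/wiki/".toList
        simp [PySem.Str.find] at *
        omega
      · exact hge
    have : (PySem.Str.find link "wikipedia.org/wiki/" + (PySem.Str.len "wikipedia.org/wiki/" : Int)).toNat
        = (PySem.Str.find link "wikipedia.org/wiki/").toNat + 19 := by
      have : (PySem.Str.len "wikipedia.org/wiki/" : Int) = 19 := by decide
      omega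
    rw [this]
    simp
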